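-- pv_equiv track=rewrite | github.com/biothings/biothings_explorer_archived | biothings_explorer/utils.py | common_member
-- ===== SOURCE A (Python) =====
-- def restructure_equivalent_ids_dict(id_dict):
--     result = []
--     for k, v in id_dict.items():
--         if type(v) == list:
--             for _v in v:
--                 result.append(k + ':' + _v)
--         else:
--             result.append(k + ':' + v)
--     return result
--
-- def common_member(a, b):
--     """Python porgram to find common elements in both sets/lists
--     """
--     a = [(i[0], restructure_equivalent_ids_dict(i[1])) for i in a]
--     b = [(i[0], restructure_equivalent_ids_dict(i[1])) for i in b]
--     matched = []
--     for i in a: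
--         for j in b:
--             a_set = set(i[1])
--             b_set = set(j[1])
--             if len(a_set.intersection(b_set)) > 0:
--                 matched.append((i[0], j[0]))
--     return matched
-- ===== SOURCE B (Python) =====
-- def common_member(a, b):
--     """Python porgram to find common elements in both sets/lists
--     """
--     # Inverted index: restructured id string -> set of indices into b.
--     index = {}
--     for jdx, (_, id_dict) in enumerate(b):
--         for k, v in id_dict.items():
--             for x in v:
--                 index.setdefault(k + ':' + x, set()).add(jdx)
--     matched = []
--     for name, id_dict in a:
--         hits = set()
--         for k, v in id_dict.items():
--             for x in v:
--                 hits |= index.get(k + ':' + x, set())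
--         for jdx in sorted(hits):
--             matched.append((name, b[jdx][0]))
--     return matched
-- ===== Notes on version B (the rewrite author's own statement) =====
-- stated objective: faster
-- what changed: Instead of A's nested loop over all (i, j) pairs that rebuilds both restructured id-sets and intersects them for every pair, B builds the restructured strings once, creates an inverted index mapping each id string to the set of b-indices containing it, gathers the matching b-indices per row of a via index lookups, and emits them in sorted (= b) order.
import Mathlib
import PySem

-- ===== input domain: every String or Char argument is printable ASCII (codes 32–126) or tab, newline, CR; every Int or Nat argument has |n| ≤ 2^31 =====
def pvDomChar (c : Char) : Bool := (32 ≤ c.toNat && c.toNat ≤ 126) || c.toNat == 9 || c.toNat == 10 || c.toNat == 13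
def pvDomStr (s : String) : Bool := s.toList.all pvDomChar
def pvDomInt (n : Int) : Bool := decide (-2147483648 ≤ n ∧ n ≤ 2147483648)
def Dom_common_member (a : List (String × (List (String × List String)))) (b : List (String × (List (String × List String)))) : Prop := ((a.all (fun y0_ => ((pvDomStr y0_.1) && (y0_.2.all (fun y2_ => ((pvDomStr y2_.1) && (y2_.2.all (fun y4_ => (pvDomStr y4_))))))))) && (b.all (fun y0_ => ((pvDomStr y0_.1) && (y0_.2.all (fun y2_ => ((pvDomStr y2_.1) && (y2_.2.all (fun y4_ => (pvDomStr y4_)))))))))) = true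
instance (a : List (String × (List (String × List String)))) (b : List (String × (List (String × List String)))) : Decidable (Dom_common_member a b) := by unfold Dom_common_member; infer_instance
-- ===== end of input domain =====

-- B replaces A's quadratic pairwise set-intersection scan with an inverted index
-- (restructured id string → set of b-indices) built once; objective: faster.

-- ===== PORT A =====
-- restructure_equivalent_ids_dict; under the type convention every value is a list,
-- so the `type(v) == list` branch is the one taken.
def pvRestructure (d : List (String × List String)) : List String :=
  d.foldl (fun res kv => kv.2.foldl (fun res v => res ++ [kv.1 ++ ":" ++ v]) res) []

def common_member (a : List (String × (List (String × List String)))) (b : List (String × (List (String × List String)))) : List (String × String) :=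
  let a' := a.map (fun i => (i.1, pvRestructure i.2))
  let b' := b.map (fun i => (i.1, pvRestructure i.2))
  a'.foldl (fun matched i =>
    b'.foldl (fun matched j =>
      let a_set := PySem.Set.ofList i.2
      let b_set := PySem.Set.ofList j.2
      if PySem.Set.len (PySem.Set.inter a_set b_set) > 0 then matched ++ [(i.1, j.1)]
      else matched) matched) []

-- ===== PORT B =====
def common_member_alt (a : List (String × (List (String × List String)))) (b : List (String × (List (String × List String)))) : List (String × String) :=
  -- index = {}; for jdx, (_, id_dict) in enumerate(b): … setdefault(k+':'+x, set()).add(jdx)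
  let index : PySem.Dict String (PySem.Set Int) :=
    (PySem.List.enumerate b).foldl (fun d ji =>
      ji.2.2.foldl (fun d kv =>
        kv.2.foldl (fun d x =>
          d.modify (kv.1 ++ ":" ++ x) PySem.Set.empty (fun s => s.add ji.1)) d) d)
      PySem.Dict.empty
  a.foldl (fun matched i =>
    let hits : PySem.Set Int :=
      i.2.foldl (fun hits kv =>
        kv.2.foldl (fun hits x =>
          hits.union (index.getD (kv.1 ++ ":" ++ x) PySem.Set.empty)) hits) PySem.Set.empty
    (PySem.List.sorted hits (fun x => x)).foldl (fun matched jdx =>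
      matched ++ [(i.1, (PySem.List.pyGetD b jdx ("", [])).1)]) matched) []

-- ===== PRECONDITION & SPEC =====
def Spec_common_member (a : List (String × (List (String × List String)))) (b : List (String × (List (String × List String)))) (out : List (String × String)) : Prop := out = common_member_alt a b
instance (a : List (String × (List (String × List String)))) (b : List (String × (List (String × List String)))) (out : List (String × String)) : Decidable (Spec_common_member a b out) := by unfold Spec_common_member; infer_instance

-- ===== CLAIM (what is proved, stated in full; the proofs are below) =====
def Claim_equal_common_member : Prop := ∀ (a : List (String × (List (String × List String)))) (b : List (String × (List (String × List String)))), Dom_common_member a b → Spec_common_member a b (common_member a b)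

-- ===== LEMMAS AND PROOFS =====

-- the multiset of restructured id strings, as a flatMap
def pvKeys (d : List (String × List String)) : List String :=
  d.flatMap (fun kv => kv.2.map (fun x => kv.1 ++ ":" ++ x))

def pvDflt : String × (List (String × List String)) := ("", [])

-- match predicate for row i of a against index k of b
def pvQ (i : String × (List (String × List String)))
    (b : List (String × (List (String × List String)))) (k : Nat) : Bool :=
  decide (∃ x ∈ pvKeys i.2, x ∈ pvKeys (b.getD k pvDflt).2)

-- the common canonical form both ports are reduced to
def pvK (a b : List (String × (List (String × List String)))) : List (String × String) :=
  a.flatMap (fun i => ((List.range b.length).filter (pvQ i b)).map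
    (fun k => (i.1, (b.getD k pvDflt).1)))

theorem pvRestructure_eq (d : List (String × List String)) : pvRestructure d = pvKeys d := by
  unfold pvRestructure pvKeys
  simp only [PySem.List.foldl_append_singleton_eq_map, PySem.List.foldl_append_eq_flatMap]
  simp

theorem pvCond_iff (xs ys : List String) :
    (PySem.Set.len (PySem.Set.inter (PySem.Set.ofList xs) (PySem.Set.ofList ys)) > 0)
      ↔ ∃ x ∈ xs, x ∈ ys := by
  unfold PySem.Set.len
  rw [gt_iff_lt, Int.natCast_pos, List.length_pos_iff_exists_mem]
  constructor
  · rintro ⟨x, hx⟩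
    have := (PySem.Set.mem_inter _ _ x).mp hx
    exact ⟨x, (PySem.Set.mem_ofList _ _).mp this.1, (PySem.Set.mem_ofList _ _).mp this.2⟩
  · rintro ⟨x, h1, h2⟩
    exact ⟨x, (PySem.Set.mem_inter _ _ x).mpr
      ⟨(PySem.Set.mem_ofList _ _).mpr h1, (PySem.Set.mem_ofList _ _).mpr h2⟩⟩

theorem pvFoldl_append_ifP {α β : Type} (P : α → Prop) [DecidablePred P] (f : α → β)
    (l : List α) (acc : List β) :
    l.foldl (fun acc x => if P x then acc ++ [f x] else acc) acc
      = acc ++ (l.filter (fun x => decide (P x))).map f := by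
  induction l generalizing acc with
  | nil => simp
  | cons x t ih =>
    by_cases h : P x <;> simp [h, ih]

theorem pvFilter_range_map {α β : Type} (l : List α) (P : α → Bool) (g : α → β) (d : α) :
    ((List.range l.length).filter (fun k => P (l.getD k d))).map (fun k => g (l.getD k d))
      = (l.filter P).map g := by
  induction l with
  | nil => simp
  | cons x t ih =>
    rw [List.length_cons, List.range_succ_eq_map]
    by_cases h : P x <;>
      simp [h, List.filter_map, List.map_map, Function.comp_def, ← ih]

-- A reduced to the canonical form
theorem pvA_eq (a b : List (String × (List (String × List String)))) :
    common_member a b = pvK a b := by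
  unfold common_member pvK
  simp only [pvRestructure_eq, pvFoldl_append_ifP, PySem.List.foldl_append_eq_flatMap,
    List.nil_append, List.flatMap_map, List.filter_map, List.map_map, pvCond_iff]
  refine List.flatMap_congr (fun i _ => ?_)
  simp only [Function.comp_def]
  unfold pvQ
  rw [pvFilter_range_map b (fun x => decide (∃ x1 ∈ pvKeys i.2, x1 ∈ pvKeys x.2))
      (fun x => ((i.1, x.1) : String × String)) pvDflt]

def pvStep (d : PySem.Dict String (PySem.Set Int)) (p : String × Int) : PySem.Dict String (PySem.Set Int) :=
  d.modify p.1 PySem.Set.empty (fun s => s.add p.2)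

-- the (key, b-index) pairs B's index loop inserts, flattened, for a starting index s
def pvKL (b : List (String × (List (String × List String)))) (s : Int) : List (String × Int) :=
  (PySem.List.enumerate b s).flatMap (fun ji =>
    ji.2.2.flatMap (fun kv => kv.2.map (fun x => (kv.1 ++ ":" ++ x, ji.1))))

def pvIndex (b : List (String × (List (String × List String)))) : PySem.Dict String (PySem.Set Int) :=
  (pvKL b 0).foldl pvStep PySem.Dict.empty

theorem pvIndex_eq (b : List (String × (List (String × List String)))) :
    ((PySem.List.enumerate b).foldl (fun d ji =>
      ji.2.2.foldl (fun d kv =>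
        kv.2.foldl (fun d x =>
          d.modify (kv.1 ++ ":" ++ x) PySem.Set.empty (fun s => s.add ji.1)) d) d)
      PySem.Dict.empty) = pvIndex b := by
  unfold pvIndex pvKL pvStep
  simp only [List.foldl_flatMap, List.foldl_map]

theorem pvMem_getD_foldl (L : List (String × Int)) (d : PySem.Dict String (PySem.Set Int))
    (key : String) (v : Int) :
    v ∈ (L.foldl pvStep d).getD key PySem.Set.empty
      ↔ v ∈ d.getD key PySem.Set.empty ∨ (key, v) ∈ L := by
  induction L generalizing d with
  | nil => simp
  | cons p t ih =>
    rw [List.foldl_cons, ih]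
    unfold pvStep
    by_cases h : key = p.1
    · subst h
      simp [PySem.Dict.getD_modify_self, PySem.Set.mem_add, Prod.ext_iff]
      tauto
    · simp [PySem.Dict.getD_modify, h, Prod.ext_iff]

theorem pvMem_KL (b : List (String × (List (String × List String)))) (s : Int)
    (key : String) (v : Int) :
    (key, v) ∈ pvKL b s ↔ ∃ k : Nat, k < b.length ∧ v = s + k ∧ key ∈ pvKeys (b.getD k pvDflt).2 := by
  induction b generalizing s with
  | nil => simp [pvKL, PySem.List.enumerate]
  | cons x t ih =>
    have hcons : pvKL (x :: t) s
        = x.2.flatMap (fun kv => kv.2.map (fun y => (kv.1 ++ ":" ++ y, s))) ++ pvKL t (s + 1) := by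
      simp [pvKL, PySem.List.enumerate]
    rw [hcons, List.mem_append, ih]
    constructor
    · rintro (h | ⟨k, hk, hv, hkey⟩)
      · simp only [List.mem_flatMap, List.mem_map, Prod.mk.injEq] at h
        obtain ⟨kv, hkv, y, hy, hk, hs⟩ := h
        refine ⟨0, by simp, by omega, ?_⟩
        simp only [List.getD_cons_zero, pvKeys, List.mem_flatMap, List.mem_map]
        exact ⟨kv, hkv, y, hy, hk⟩
      · exact ⟨k + 1, by simp only [List.length_cons]; omega, by push_cast; omega, by simpa using hkey⟩
    · rintro ⟨k, hk, hv, hkey⟩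
      cases k with
      | zero =>
        left
        simp only [List.getD_cons_zero] at hkey
        simp only [pvKeys, List.mem_flatMap, List.mem_map, Prod.mk.injEq] at hkey ⊢
        obtain ⟨kv, hkv, y, hy, hkey⟩ := hkey
        exact ⟨kv, hkv, y, hy, hkey, by push_cast at hv; omega⟩
      | succ k =>
        right
        exact ⟨k, by simp only [List.length_cons] at hk; omega, by push_cast at hv ⊢; omega, by simpa using hkey⟩

theorem pvMem_foldl_union (l : List String) (g : String → PySem.Set Int)
    (s0 : PySem.Set Int) (v : Int) :
    v ∈ l.foldl (fun s x => s.union (g x)) s0 ↔ v ∈ s0 ∨ ∃ x ∈ l, v ∈ g x := by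
  induction l generalizing s0 with
  | nil => simp
  | cons y t ih => rw [List.foldl_cons, ih]; simp [PySem.Set.mem_union]; tauto

theorem pvNodup_foldl_union (l : List String) (g : String → PySem.Set Int)
    (s0 : PySem.Set Int) (h : s0.Nodup) :
    (l.foldl (fun s x => s.union (g x)) s0).Nodup := by
  induction l generalizing s0 with
  | nil => exact h
  | cons y t ih => exact ih _ (PySem.Set.nodup_union _ _ h)

def pvHits (l : List (String × List String)) (b : List (String × (List (String × List String)))) :
    PySem.Set Int :=
  (pvKeys l).foldl (fun s x => s.union ((pvIndex b).getD x PySem.Set.empty)) PySem.Set.empty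

theorem pvHits_eq (l : List (String × List String))
    (b : List (String × (List (String × List String)))) :
    l.foldl (fun hits kv =>
      kv.2.foldl (fun hits x =>
        hits.union ((pvIndex b).getD (kv.1 ++ ":" ++ x) PySem.Set.empty)) hits) PySem.Set.empty
      = pvHits l b := by
  unfold pvHits pvKeys
  simp only [List.foldl_flatMap, List.foldl_map]

theorem pvMem_hits (l : List (String × List String))
    (b : List (String × (List (String × List String)))) (v : Int) :
    v ∈ pvHits l b
      ↔ ∃ k : Nat, k < b.length ∧ v = (k : Int)
          ∧ ∃ x ∈ pvKeys l, x ∈ pvKeys (b.getD k pvDflt).2 := by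
  unfold pvHits pvIndex
  rw [pvMem_foldl_union]
  simp only [pvMem_getD_foldl, pvMem_KL, PySem.Dict.getD_empty]
  constructor
  · rintro (h | ⟨x, hx, h | ⟨k, hk, hv, hkey⟩⟩)
    · simp [PySem.Set.empty] at h
    · simp [PySem.Set.empty] at h
    · exact ⟨k, hk, by omega, x, hx, hkey⟩
  · rintro ⟨k, hk, hv, x, hx, hkey⟩
    exact Or.inr ⟨x, hx, Or.inr ⟨k, hk, by omega, hkey⟩⟩

theorem pvNodup_hits (l : List (String × List String))
    (b : List (String × (List (String × List String)))) : (pvHits l b).Nodup :=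
  pvNodup_foldl_union _ _ _ List.nodup_nil

theorem pvSorted_hits (l : List (String × List String))
    (b : List (String × (List (String × List String)))) :
    PySem.List.sorted (pvHits l b) (fun x => x)
      = ((List.range b.length).filter
          (fun k => decide (∃ x ∈ pvKeys l, x ∈ pvKeys (b.getD k pvDflt).2))).map
          (fun k => ((k : Nat) : Int)) := by
  apply PySem.List.sorted_eq_of_perm_of_pairwise_lt
  · refine (List.perm_ext_iff_of_nodup ?_ (pvNodup_hits l b)).mpr ?_
    · exact ((List.nodup_range).filter _).map (fun h1 h2 h => by exact_mod_cast h)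
    · intro v
      rw [pvMem_hits]
      simp only [List.mem_map, List.mem_filter, List.mem_range, decide_eq_true_eq]
      constructor
      · rintro ⟨k, ⟨hk, hx⟩, rfl⟩
        exact ⟨k, hk, rfl, hx⟩
      · rintro ⟨k, hk, rfl, hx⟩
        exact ⟨k, ⟨hk, hx⟩, rfl⟩
  · rw [List.pairwise_map]
    exact (List.pairwise_lt_range.filter _).imp (fun h => by exact_mod_cast h)

-- B reduced to the canonical form
theorem pvB_eq (a b : List (String × (List (String × List String)))) :
    common_member_alt a b = pvK a b := by
  unfold common_member_alt pvK
  simp only [pvIndex_eq, pvHits_eq, pvSorted_hits,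
    PySem.List.foldl_append_singleton_eq_map, PySem.List.foldl_append_eq_flatMap,
    List.nil_append, List.map_map, Function.comp_def, PySem.List.pyGetD_natCast]
  refine List.flatMap_congr (fun i _ => ?_)
  unfold pvQ
  rfl

-- ===== VERDICT (by name: the statement is the Claim_ definition above) =====
theorem common_member_spec : Claim_equal_common_member := by
  intro a b _
  unfold Spec_common_member
  rw [pvA_eq, pvB_eq]
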